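-- pv_equiv track=rewrite | github.com/zulker01/cryptography | 4-1_Cryptography-Lab-Assignments-main/Assignment_4/55_AES_Assignment4.py | modular
-- ===== SOURCE A (Python) =====
-- def modular(m):
--     while True:
--         a = bin(m)[2:]
--         b = ""
--         b = bin(283)[2:]
--         check = (len(a)-1)-(len(b)-1)
--         if check < 0:
--             return m
--         m = m ^ (283 << check)
-- ===== SOURCE B (Python) =====
-- def modular(m):
--     # Byte-fold reduction: instead of clearing one top bit per round, use the
--     # identity x^8 = x^4 + x^3 + x + 1 (mod the AES polynomial 283) to replace
--     # the whole high part at once: m = hi*2^8 + lo  ==>  m = lo ^ hi*(x^4+x^3+x+1)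
--     # (carry-less), repeated until m fits in one byte.
--     while m >= 256:
--         hi = m >> 8
--         m = (m & 255) ^ hi ^ (hi << 1) ^ (hi << 3) ^ (hi << 4)
--     return m
-- ===== Notes on version B (the rewrite author's own statement) =====
-- stated objective: alternative
-- what changed: A does schoolbook polynomial long division, re-measuring the current top bit each round via bin() strings and clearing it with one aligned XOR of 283; B never looks for the top bit: it folds the whole high part down a byte at a time using the identity x^8 = x^4+x^3+x+1 mod the AES polynomial, replacing hi*2^8 by the carry-less product hi*27 each pass.
-- outside the precondition, e.g. on modular(-128): A does not finish within the time limit, B returns -128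
import Mathlib
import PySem

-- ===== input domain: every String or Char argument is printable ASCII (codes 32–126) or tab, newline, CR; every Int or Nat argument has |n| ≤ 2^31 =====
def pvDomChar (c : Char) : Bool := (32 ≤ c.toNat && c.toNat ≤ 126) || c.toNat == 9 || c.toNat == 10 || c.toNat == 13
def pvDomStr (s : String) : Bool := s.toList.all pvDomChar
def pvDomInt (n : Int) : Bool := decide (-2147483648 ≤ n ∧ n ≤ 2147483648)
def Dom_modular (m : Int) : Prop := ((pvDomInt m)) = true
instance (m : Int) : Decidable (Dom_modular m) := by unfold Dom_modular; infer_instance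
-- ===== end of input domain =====

-- B replaces A's top-down long division (find the current leading bit via bin() string
-- lengths, clear it with one aligned XOR of 283 per round) by byte folding: it uses
-- x^8 ≡ x^4+x^3+x+1 modulo the AES polynomial to substitute the whole high part at once
-- (objective: alternative).

-- ===== PORT A =====
-- A's 'while True' loop; the fuel only makes the recursion total: it exceeds the
-- number of iterations wherever A terminates (A diverges for m ≤ -128, outside Pre_).
def modularGo : Nat → Int → Int
  | 0, m => m
  | fuel+1, m =>
    let a := PySem.List.slice (PySem.Int.toBinChars0b m) (some 2) none      -- a = bin(m)[2:]
    let b := PySem.List.slice (PySem.Int.toBinChars0b 283) (some 2) none    -- b = bin(283)[2:]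
    let check : Int := ((a.length : Int) - 1) - ((b.length : Int) - 1)
    if check < 0 then m
    else modularGo fuel (PySem.Int.bxor m ((283 : Int) <<< check.toNat))    -- check ≥ 0 here, so .toNat is exact

def modular (m : Int) : Int := modularGo (PySem.Int.bitLength m + 1) m

-- ===== PORT B =====
-- B's 'while m >= 256' loop; the fuel exceeds the number of iterations (each pass
-- strictly lowers the bit length, proved below).
def modularAltGo : Nat → Int → Int
  | 0, m => m
  | fuel+1, m =>
    if 256 ≤ m then
      let hi := m >>> 8
      modularAltGo fuel
        (PySem.Int.bxor (PySem.Int.bxor (PySem.Int.bxor (PySem.Int.bxor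
          (PySem.Int.band m 255) hi) (hi <<< 1)) (hi <<< 3)) (hi <<< 4))
    else m

def modular_alt (m : Int) : Int := modularAltGo (PySem.Int.bitLength m + 1) m

-- ===== PRECONDITION & SPEC =====
-- Pre_ excludes m ≤ -128, where A never returns: bin(m)[2:] keeps the 'b' of the '-0b'
-- prefix, the miscounted degree makes the XOR raise |m| instead of lowering it, and the
-- while-loop runs forever.  (For -128 < m < 0 A returns m at once, and B agrees.)
def Pre_modular (m : Int) : Prop := -128 < m
instance (m : Int) : Decidable (Pre_modular m) := by unfold Pre_modular; infer_instance
def pvWitness_modular : Int := (300)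

def Spec_modular (m : Int) (out : Int) : Prop := out = modular_alt m
instance (m : Int) (out : Int) : Decidable (Spec_modular m out) := by unfold Spec_modular; infer_instance

-- ===== CLAIM (what is proved, stated in full; the proofs are below) =====
def Claim_equal_modular : Prop := ∀ (m : Int), Dom_modular m → Pre_modular m → Spec_modular m (modular m)

-- ===== LEMMAS AND PROOFS =====

-- carry-less (GF(2)) multiplication, recursing on the bits of q
def clmul (q p : Nat) : Nat :=
  if q = 0 then 0
  else (if q % 2 = 1 then p else 0) ^^^ ((clmul (q / 2) p) <<< 1)
decreasing_by exact Nat.div_lt_self (by omega) (by omega)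

lemma clmul_zero (p : Nat) : clmul 0 p = 0 := by rw [clmul]; simp

lemma xor_left_comm (a b c : Nat) : a ^^^ (b ^^^ c) = b ^^^ (a ^^^ c) := by
  rw [← Nat.xor_assoc, Nat.xor_comm a b, Nat.xor_assoc]

lemma xor_cancel_mid (s a r : Nat) : s ^^^ ((a ^^^ s) ^^^ r) = a ^^^ r := by
  rw [← Nat.xor_assoc, Nat.xor_comm a s, Nat.xor_xor_cancel_left]

lemma xor_cancel_mid' (a s r : Nat) : (a ^^^ s) ^^^ (s ^^^ r) = a ^^^ r := by
  rw [Nat.xor_assoc, Nat.xor_xor_cancel_left]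

-- XOR with something below 2^k keeps everything from bit k up
lemma ge_xor_small (x b k : Nat) (hx : 2^k ≤ x) (hb : b < 2^k) : 2^k ≤ x ^^^ b := by
  have hdiv : (x ^^^ b) / 2^k = x / 2^k := by
    rw [Nat.xor_div_two_pow, Nat.div_eq_of_lt hb, Nat.xor_zero]
  have h1 : 1 ≤ (x ^^^ b) / 2^k := by
    rw [hdiv]; exact (Nat.one_le_div_iff (Nat.pow_pos (by omega))).2 hx
  calc 2^k = 1 * 2^k := by ring
  _ ≤ ((x ^^^ b) / 2^k) * 2^k := Nat.mul_le_mul_right _ h1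
  _ ≤ x ^^^ b := Nat.div_mul_le_self _ _

-- a nonzero carry-less multiple of 283 is at least 2^8
lemma clmul_283_ge (q : Nat) (hq : q ≠ 0) : 256 ≤ clmul q 283 := by
  induction q using Nat.strong_induction_on with
  | _ q ih =>
    rw [clmul, if_neg hq]
    by_cases h2 : q / 2 = 0
    · have h1 : q = 1 := by omega
      subst h1
      rw [clmul_zero]
      norm_num
    · have ihq := ih (q / 2) (Nat.div_lt_self (by omega) (by omega)) h2
      have hhi : 2^9 ≤ (clmul (q / 2) 283) <<< 1 := by
        rw [Nat.shiftLeft_eq]; norm_num; omega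
      have hb : (if q % 2 = 1 then (283:Nat) else 0) < 2^9 := by split <;> norm_num
      have := ge_xor_small _ _ 9 hhi hb
      rw [Nat.xor_comm] at this
      norm_num at this ⊢
      omega

-- XOR-linearity of clmul in its first argument
lemma clmul_xor (p : Nat) : ∀ q1 q2 : Nat, clmul (q1 ^^^ q2) p = clmul q1 p ^^^ clmul q2 p := by
  intro q1
  induction q1 using Nat.strong_induction_on with
  | _ q1 ih =>
    intro q2
    by_cases h1 : q1 = 0
    · subst h1; simp [clmul_zero]
    by_cases h2 : q2 = 0
    · subst h2; simp [clmul_zero]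
    by_cases hx : q1 ^^^ q2 = 0
    · rw [hx, clmul_zero, Nat.xor_eq_zero.mp hx, Nat.xor_self]
    · have hpar : (if (q1 ^^^ q2) % 2 = 1 then p else 0)
          = (if q1 % 2 = 1 then p else 0) ^^^ (if q2 % 2 = 1 then p else 0) := by
        have hm := Nat.xor_mod_two_eq (m := q1) (n := q2)
        rcases Nat.mod_two_eq_zero_or_one q1 with ha | ha <;>
          rcases Nat.mod_two_eq_zero_or_one q2 with hb | hb <;>
          · rw [hm, Nat.add_mod, ha, hb]
            simp
      have hq1 : clmul q1 p = (if q1 % 2 = 1 then p else 0) ^^^ ((clmul (q1 / 2) p) <<< 1) := by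
        rw [clmul, if_neg h1]
      have hq2 : clmul q2 p = (if q2 % 2 = 1 then p else 0) ^^^ ((clmul (q2 / 2) p) <<< 1) := by
        rw [clmul, if_neg h2]
      conv_lhs => rw [clmul]
      rw [if_neg hx, Nat.xor_div_two, ih (q1/2) (Nat.div_lt_self (by omega) (by omega)) (q2/2),
          hpar, Nat.shiftLeft_xor_distrib, hq1, hq2]
      simp [Nat.xor_comm, xor_left_comm]

-- clmul by a power of two is a shift
lemma clmul_two_pow (k p : Nat) : clmul (2^k) p = p <<< k := by
  induction k with
  | zero =>
    rw [clmul]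
    norm_num
    rw [clmul_zero]
    simp
  | succ k ih =>
    rw [clmul, if_neg (by positivity)]
    have hm : 2^(k+1) % 2 = 0 := by
      rw [pow_succ, Nat.mul_mod_left]
    have hd : 2^(k+1) / 2 = 2^k := by
      rw [pow_succ, Nat.mul_div_cancel _ (by omega)]
    rw [hm, hd, ih]
    simp [← Nat.shiftLeft_add]

-- splitting off the low bit
lemma split_bit (h : Nat) : ((h/2) <<< 1) ^^^ (h % 2) = h := by
  rcases Nat.mod_two_eq_zero_or_one h with hb | hb <;> rw [hb, Nat.shiftLeft_eq]
  · simp; omega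
  · rw [Nat.xor_one_of_even ⟨h/2, by ring⟩]; omega

-- XOR of a shifted value with a small value is addition (disjoint bits)
lemma xor_disjoint_low (x y k : Nat) (hy : y < 2^k) : (x <<< k) ^^^ y = x * 2^k + y := by
  have h1 : ((x <<< k) ^^^ y) % 2^k = y := by
    rw [Nat.xor_mod_two_pow, Nat.shiftLeft_eq, Nat.mul_mod_left, Nat.mod_eq_of_lt hy, Nat.zero_xor]
  have h2 : ((x <<< k) ^^^ y) / 2^k = x := by
    rw [Nat.xor_div_two_pow, Nat.shiftLeft_eq, Nat.mul_div_cancel _ (Nat.pow_pos (by omega)),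
        Nat.div_eq_of_lt hy, Nat.xor_zero]
  have h3 := Nat.div_add_mod ((x <<< k) ^^^ y) (2^k)
  rw [h1, h2, Nat.mul_comm (2^k) x] at h3
  omega

-- byte-fold identity: h<<<8 ^ h<<<4 ^ h<<<3 ^ h<<<1 ^ h = clmul h 283
lemma fold_eq_clmul (h : Nat) :
    ((((h <<< 8) ^^^ (h <<< 4)) ^^^ (h <<< 3)) ^^^ (h <<< 1)) ^^^ h = clmul h 283 := by
  induction h using Nat.strong_induction_on with
  | _ h ih =>
    by_cases h0 : h = 0
    · subst h0; simp [clmul_zero]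
    · have haux : (if h % 2 = 1 then (283:Nat) else 0)
          = (((((h % 2) <<< 8) ^^^ ((h % 2) <<< 4)) ^^^ ((h % 2) <<< 3)) ^^^ ((h % 2) <<< 1)) ^^^ (h % 2) := by
        rcases Nat.mod_two_eq_zero_or_one h with hb | hb <;> rw [hb] <;> decide
      conv_rhs => rw [clmul, if_neg h0, ← ih (h/2) (Nat.div_lt_self (by omega) (by omega))]
      conv_lhs => rw [← split_bit h]
      rw [haux]
      simp only [Nat.shiftLeft_xor_distrib, ← Nat.shiftLeft_add]
      norm_num
      simp [Nat.xor_assoc, Nat.xor_comm, xor_left_comm]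

-- ---- A-side string/bit lemmas ----

lemma lenCore (f : Nat) : ∀ (n : Nat), 0 < n → n < 2^f →
    (Nat.toDigitsCore 2 f n []).length = PySem.Int.bitLength (n : Int) := by
  induction f with
  | zero => intro n h1 h2; omega
  | succ f ih =>
    intro n h1 h2
    rw [PySem.Int.bitLength_natCast h1]
    by_cases hz : n / 2 = 0
    · have hn1 : n = 1 := by omega
      subst hn1
      simp [Nat.toDigitsCore, PySem.Int.bitLength_zero]
    · have h12 : 0 < n / 2 := by omega
      have h22 : n / 2 < 2^f := by
        have h := Nat.pow_succ 2 f
        omega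
      rw [show Nat.toDigitsCore 2 (f+1) n []
            = Nat.toDigitsCore 2 f (n/2) [(n % 2).digitChar] from by
          simp [Nat.toDigitsCore, hz]]
      rw [Nat.toDigitsCore_lens_eq, ih (n/2) h12 h22]

lemma len_toDigits_two (n : Nat) (h : 0 < n) :
    (Nat.toDigits 2 n).length = PySem.Int.bitLength (n : Int) := by
  have hn : n < 2^(n+1) :=
    lt_of_lt_of_le Nat.lt_two_pow_self (Nat.pow_le_pow_right (by omega) (by omega))
  exact lenCore (n+1) n h hn

lemma alen_pos (m : Int) (h0 : 0 < m) :
    (PySem.List.slice (PySem.Int.toBinChars0b m) (some 2) none).length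
      = PySem.Int.bitLength m := by
  rw [PySem.List.slice_from _ (by norm_num)]
  have hneg : ¬ m < 0 := by omega
  simp only [PySem.Int.toBinChars0b, if_neg hneg]
  rw [show ((2:Int)).toNat = 2 from rfl]
  simp only [List.drop_succ_cons, List.drop_zero]
  rw [len_toDigits_two m.toNat (by omega)]
  congr 1
  omega

lemma alen_neg (m : Int) (h0 : m < 0) :
    (PySem.List.slice (PySem.Int.toBinChars0b m) (some 2) none).length
      = PySem.Int.bitLength m + 1 := by
  rw [PySem.List.slice_from _ (by norm_num)]
  simp only [PySem.Int.toBinChars0b, if_pos h0]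
  rw [show ((2:Int)).toNat = 2 from rfl]
  simp only [List.drop_succ_cons, List.drop_zero, List.length_cons]
  rw [len_toDigits_two m.natAbs (by omega)]
  rw [show ((m.natAbs : Int)) = -m from by omega, PySem.Int.bitLength_neg]

lemma blen_283 :
    (PySem.List.slice (PySem.Int.toBinChars0b 283) (some 2) none).length = 9 := by decide

lemma bl_le_of_natAbs_lt (m : Int) (k : Nat) (h : m.natAbs < 2^k) :
    PySem.Int.bitLength m ≤ k := by
  by_contra hc
  have h1 := PySem.Int.two_pow_bitLength_le m (by
    intro h0; subst h0; simp [PySem.Int.bitLength_zero] at hc)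
  have h2 : 2^k ≤ 2^(PySem.Int.bitLength m - 1) :=
    Nat.pow_le_pow_right (by omega) (by omega)
  omega

lemma nine_le_bl (m : Int) (h : 256 ≤ m) : 9 ≤ PySem.Int.bitLength m := by
  by_contra hc
  have h1 := PySem.Int.lt_two_pow_bitLength m
  have h2 : 2^(PySem.Int.bitLength m) ≤ 2^8 :=
    Nat.pow_le_pow_right (by omega) (by omega)
  norm_num at h2
  omega

lemma natCast_shl (x k : Nat) : (((x : Nat) : Int) <<< k) = ((x <<< k : Nat) : Int) := by
  rw [Int.shiftLeft_eq, Nat.shiftLeft_eq]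
  push_cast
  ring

-- A's loop: base case (returns m) and one step
lemma go_base (fuel : Nat) (m : Int) (h1 : -128 < m) (h2 : m < 256) :
    modularGo fuel m = m := by
  cases fuel with
  | zero => rfl
  | succ fuel =>
    simp only [modularGo]
    rw [blen_283, if_pos]
    rcases lt_trichotomy m 0 with hm | hm | hm
    · rw [alen_neg m hm]
      have : PySem.Int.bitLength m ≤ 7 := bl_le_of_natAbs_lt m 7 (by norm_num; omega)
      push_cast
      omega
    · subst hm; decide
    · rw [alen_pos m hm]
      have : PySem.Int.bitLength m ≤ 8 := bl_le_of_natAbs_lt m 8 (by norm_num; omega)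
      push_cast
      omega

lemma go_step (fuel : Nat) (m : Int) (h : 256 ≤ m) :
    modularGo (fuel+1) m
      = modularGo fuel
          (PySem.Int.bxor m ((283 <<< (PySem.Int.bitLength m - 9) : Nat) : Int)) := by
  have h9 := nine_le_bl m h
  simp only [modularGo]
  rw [blen_283, alen_pos m (by omega), if_neg (by omega)]
  have hE : ((((PySem.Int.bitLength m : Nat)) : Int) - 1 - (((9:Nat) : Int) - 1)).toNat
      = PySem.Int.bitLength m - 9 := by omega
  rw [hE, show ((283:Int)) = (((283:Nat)):Int) from rfl, natCast_shl]

-- the top bit of a ^ (283 << (L-9)) is cleared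
lemma xor_top (L : Nat) (hL : 9 ≤ L) (a : Nat) (ha1 : 2^(L-1) ≤ a) (ha2 : a < 2^L) :
    a ^^^ (283 <<< (L-9)) < 2^(L-1) := by
  set b := 283 <<< (L-9) with hb
  have hbv : b = 283 * 2^(L-9) := by rw [hb, Nat.shiftLeft_eq]
  have hpow : 2^(L-1) = 2^(L-9) * 2^8 := by
    rw [← Nat.pow_add]; congr 1; omega
  have hpowL : 2^L = 2^(L-9) * 2^9 := by
    rw [← Nat.pow_add]; congr 1; omega
  have hp9 : 0 < 2^(L-9) := Nat.pow_pos (by omega)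
  have hb1 : 2^(L-1) ≤ b := by rw [hbv, hpow]; nlinarith
  have hb2 : b < 2^L := by rw [hbv, hpowL]; nlinarith
  apply Nat.lt_pow_two_of_testBit
  intro i hi
  rw [Nat.testBit_xor]
  rcases Nat.lt_or_ge i L with hiL | hiL
  · have hieq : i = L - 1 := by omega
    subst hieq
    have hda : a / 2^(L-1) = 1 := by
      apply Nat.div_eq_of_lt_le <;> omega
    have hdb : b / 2^(L-1) = 1 := by
      apply Nat.div_eq_of_lt_le <;> omega
    simp [Nat.testBit_eq_decide_div_mod_eq, hda, hdb]
  · have h2i : 2^L ≤ 2^i := Nat.pow_le_pow_right (by omega) hiL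
    have hda : a / 2^i = 0 := Nat.div_eq_of_lt (by omega)
    have hdb : b / 2^i = 0 := Nat.div_eq_of_lt (by omega)
    simp [Nat.testBit_eq_decide_div_mod_eq, hda, hdb]

-- A's loop: ends below 256 having XORed in a carry-less multiple of 283
lemma A_loop (n : Nat) : ∀ (fuel : Nat) (a : Nat), PySem.Int.bitLength (a : Int) ≤ n → n ≤ fuel + 8 →
    ∃ r q : Nat, modularGo (fuel+1) (a : Int) = (r : Int) ∧ r < 256 ∧ a ^^^ r = clmul q 283 := by
  induction n with
  | zero =>
    intro fuel a hbl _
    have hlt := PySem.Int.lt_two_pow_bitLength (a : Int)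
    have ha : a = 0 := by
      have h2 : 2^(PySem.Int.bitLength (a:Int)) ≤ 2^0 := Nat.pow_le_pow_right (by omega) hbl
      simp at hlt h2
      omega
    subst ha
    exact ⟨0, 0, go_base _ _ (by norm_num) (by norm_num), by norm_num, by simp [clmul_zero]⟩
  | succ n ih =>
    intro fuel a hbl hf
    by_cases hsm : a < 256
    · refine ⟨a, 0, go_base _ _ ?_ (by exact_mod_cast hsm), hsm, by simp [clmul_zero]⟩
      have := Int.natCast_nonneg a
      omega
    · have h256 : (256 : Int) ≤ (a : Int) := by exact_mod_cast Nat.le_of_not_lt hsm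
      have h9 := nine_le_bl (a : Int) h256
      set L := PySem.Int.bitLength (a : Int) with hLdef
      obtain ⟨f0, rfl⟩ : ∃ f0, fuel = f0 + 1 := ⟨fuel - 1, by omega⟩
      rw [go_step (f0+1) _ h256]
      rw [show PySem.Int.bxor (a:Int) ((283 <<< (L - 9) : Nat) : Int)
            = ((a ^^^ (283 <<< (L-9)) : Nat) : Int) from by
        exact_mod_cast PySem.Int.bxor_natCast a (283 <<< (L-9))]
      have hlt := PySem.Int.lt_two_pow_bitLength (a : Int)
      have hge := PySem.Int.two_pow_bitLength_le (a : Int) (by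
        intro h; rw [h] at h256; norm_num at h256)
      rw [← hLdef] at hlt hge
      simp only [Int.natAbs_natCast] at hlt hge
      have hxt := xor_top L h9 a hge hlt
      have hblm : PySem.Int.bitLength ((a ^^^ (283 <<< (L-9)) : Nat) : Int) ≤ n := by
        have := bl_le_of_natAbs_lt ((a ^^^ (283 <<< (L-9)) : Nat) : Int) (L-1)
          (by simpa using hxt)
        omega
      obtain ⟨r, q, hr, hr256, hspan⟩ := ih f0 _ hblm (by omega)
      refine ⟨r, 2^(L-9) ^^^ q, hr, hr256, ?_⟩
      rw [clmul_xor, clmul_two_pow, ← hspan, xor_cancel_mid]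

-- ---- B-side lemmas ----

-- the value B's loop body assigns, in Nat form
def bstep (a : Nat) : Nat :=
  ((((a &&& 255) ^^^ (a >>> 8)) ^^^ ((a >>> 8) <<< 1)) ^^^ ((a >>> 8) <<< 3)) ^^^ ((a >>> 8) <<< 4)

lemma altGo_step (fuel : Nat) (a : Nat) (h : (256 : Int) ≤ (a : Int)) :
    modularAltGo (fuel+1) (a : Int) = modularAltGo fuel ((bstep a : Nat) : Int) := by
  simp only [modularAltGo, if_pos h]
  congr 1

-- one fold step keeps the value equivalent: a ^ bstep a is a carry-less multiple of 283
lemma bstep_span (a : Nat) : a ^^^ bstep a = clmul (a >>> 8) 283 := by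
  have hand : a &&& 255 < 2^8 := by
    have := Nat.and_le_right (n := a) (m := 255)
    norm_num
    omega
  have hsplit : ((a >>> 8) <<< 8) ^^^ (a &&& 255) = a := by
    rw [xor_disjoint_low _ _ 8 hand, Nat.shiftRight_eq_div_pow,
        show (255 : Nat) = 2^8 - 1 from by norm_num, Nat.and_two_pow_sub_one_eq_mod]
    have := Nat.div_add_mod a (2^8)
    omega
  have key : ∀ hi lo : Nat,
      ((hi <<< 8) ^^^ lo) ^^^ ((((lo ^^^ hi) ^^^ (hi <<< 1)) ^^^ (hi <<< 3)) ^^^ (hi <<< 4))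
        = clmul hi 283 := by
    intro hi lo
    rw [← fold_eq_clmul]
    simp [Nat.xor_assoc, Nat.xor_comm, xor_left_comm, Nat.xor_xor_cancel_left]
  calc a ^^^ bstep a = (((a >>> 8) <<< 8) ^^^ (a &&& 255)) ^^^ bstep a := by rw [hsplit]
  _ = clmul (a >>> 8) 283 := by unfold bstep; exact key _ _

-- one fold step strictly lowers the bit length
lemma bstep_bl (a : Nat) (h : 256 ≤ a) :
    bstep a < 2^(PySem.Int.bitLength (a : Int) - 1) := by
  set L := PySem.Int.bitLength (a : Int) with hLdef
  have h9 := nine_le_bl (a : Int) (by exact_mod_cast h)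
  rw [← hLdef] at h9
  have hlt := PySem.Int.lt_two_pow_bitLength (a : Int)
  rw [← hLdef] at hlt
  simp only [Int.natAbs_natCast] at hlt
  have hhi : a >>> 8 < 2^(L-8) := by
    rw [Nat.shiftRight_eq_div_pow]
    apply Nat.div_lt_of_lt_mul
    calc a < 2^L := hlt
    _ = 2^8 * 2^(L-8) := by rw [← Nat.pow_add]; congr 1; omega
  have hsh : ∀ k : Nat, k ≤ 4 → (a >>> 8) <<< k < 2^(L-1) := by
    intro k hk
    rw [Nat.shiftLeft_eq]
    calc (a >>> 8) * 2^k < 2^(L-8) * 2^k :=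
          mul_lt_mul_of_pos_right hhi (Nat.pow_pos (by omega))
    _ = 2^(L-8+k) := by rw [← Nat.pow_add]
    _ ≤ 2^(L-1) := Nat.pow_le_pow_right (by omega) (by omega)
  have hand : a &&& 255 < 2^(L-1) := by
    have h1 := Nat.and_le_right (n := a) (m := 255)
    have h2 : (2:Nat)^8 ≤ 2^(L-1) := Nat.pow_le_pow_right (by omega) (by omega)
    norm_num at h2
    omega
  have h0 : a >>> 8 < 2^(L-1) := by
    have := hsh 0 (by omega)
    rwa [Nat.shiftLeft_zero] at this
  unfold bstep
  exact Nat.xor_lt_two_pow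
    (Nat.xor_lt_two_pow
      (Nat.xor_lt_two_pow
        (Nat.xor_lt_two_pow hand h0)
        (hsh 1 (by omega)))
      (hsh 3 (by omega)))
    (hsh 4 (by omega))

-- B's loop: ends below 256 having XORed in a carry-less multiple of 283
lemma B_loop (n : Nat) : ∀ (fuel : Nat) (a : Nat), PySem.Int.bitLength (a : Int) ≤ n → n ≤ fuel + 8 →
    ∃ r q : Nat, modularAltGo (fuel+1) (a : Int) = (r : Int) ∧ r < 256 ∧ a ^^^ r = clmul q 283 := by
  induction n with
  | zero =>
    intro fuel a hbl _
    have hlt := PySem.Int.lt_two_pow_bitLength (a : Int)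
    have ha : a = 0 := by
      have h2 : 2^(PySem.Int.bitLength (a:Int)) ≤ 2^0 := Nat.pow_le_pow_right (by omega) hbl
      simp at hlt h2
      omega
    subst ha
    refine ⟨0, 0, ?_, by norm_num, by simp [clmul_zero]⟩
    simp [modularAltGo]
  | succ n ih =>
    intro fuel a hbl hf
    by_cases hsm : a < 256
    · refine ⟨a, 0, ?_, hsm, by simp [clmul_zero]⟩
      simp only [modularAltGo]
      rw [if_neg (by exact_mod_cast Nat.not_le.mpr hsm)]
    · have h256n : 256 ≤ a := Nat.le_of_not_lt hsm
      have h256 : (256 : Int) ≤ (a : Int) := by exact_mod_cast h256n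
      have h9 := nine_le_bl (a : Int) h256
      obtain ⟨f0, rfl⟩ : ∃ f0, fuel = f0 + 1 := ⟨fuel - 1, by omega⟩
      rw [altGo_step (f0+1) a h256]
      have hblm : PySem.Int.bitLength ((bstep a : Nat) : Int) ≤ n := by
        have := bl_le_of_natAbs_lt ((bstep a : Nat) : Int)
          (PySem.Int.bitLength (a : Int) - 1) (by simpa using bstep_bl a h256n)
        omega
      obtain ⟨r, q, hr, hr256, hspan⟩ := ih f0 _ hblm (by omega)
      refine ⟨r, (a >>> 8) ^^^ q, hr, hr256, ?_⟩
      rw [clmul_xor, ← bstep_span, ← hspan, xor_cancel_mid']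

-- ===== VERDICT (by name: the statement is the Claim_ definition above) =====
theorem modular_spec : Claim_equal_modular := by
  intro m _ hpre
  unfold Pre_modular at hpre
  unfold Spec_modular
  show modular m = modular_alt m
  unfold modular modular_alt
  rcases Int.lt_or_le m 0 with hm | hm
  · -- -128 < m < 0: A returns m at once, B's loop test fails at once
    rw [go_base _ m hpre (by omega)]
    simp only [modularAltGo]
    rw [if_neg (by omega)]
  · obtain ⟨a, rfl⟩ : ∃ a : Nat, m = (a : Int) := ⟨m.toNat, by omega⟩
    obtain ⟨r1, q1, h1, h1256, hs1⟩ :=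
      A_loop (PySem.Int.bitLength (a : Int)) (PySem.Int.bitLength (a : Int)) a le_rfl (by omega)
    obtain ⟨r2, q2, h2, h2256, hs2⟩ :=
      B_loop (PySem.Int.bitLength (a : Int)) (PySem.Int.bitLength (a : Int)) a le_rfl (by omega)
    rw [h1, h2]
    congr 1
    have hxor : r1 ^^^ r2 = clmul (q1 ^^^ q2) 283 := by
      rw [clmul_xor, ← hs1, ← hs2, Nat.xor_comm a r1, Nat.xor_assoc, Nat.xor_cancel_left]
    by_cases hq : q1 ^^^ q2 = 0
    · rw [hq, clmul_zero] at hxor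
      exact Nat.xor_eq_zero.mp hxor
    · exfalso
      have hge := clmul_283_ge _ hq
      have e1 : r1 < 2^8 := by omega
      have e2 : r2 < 2^8 := by omega
      have hlt2 := Nat.xor_lt_two_pow e1 e2
      rw [← hxor] at hge
      omega
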